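-- pv_equiv track=rewrite | github.com/Rophu/travail-IUT | ExoMdP.py | comporte_au_moins_huit_caracteres
-- ===== SOURCE A (Python) =====
-- def comporte_au_moins_huit_caracteres(chaine):
--     """
--     verifie si chaine comporte au moins 8 caracteres
--     paramètres formels: chaine, une chaine de caractères(type str)
--     résultat: "chaine_de_au_moins_huit_caractere", un booléen. il est True
--               si la chaine comporte au moins 8 caractères, False sinon
--     invariant: le nombre de caractères inférieur à 8 dans chaine de
--                 l'indice 0 à 'indice'-1
--     """
--     indice=0
--     chaine_de_au_moins_huit_caractere=False
--     while  indice<len(chaine) and not chaine_de_au_moins_huit_caractere: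
--         if indice>7:
--             chaine_de_au_moins_huit_caractere=True
--         indice+=1
--     return chaine_de_au_moins_huit_caractere
-- ===== SOURCE B (Python) =====
-- def comporte_au_moins_huit_caracteres(chaine):
--     return len(chaine) >= 8
-- ===== Notes on version B (the rewrite author's own statement) =====
-- stated objective: simpler
-- what changed: Replaces the counting while-loop and flag with a single closed-form length comparison len(chaine) >= 8.
-- intended difference: On strings of exactly 8 characters A returns False (its flag is only set at index 8, i.e. length >= 9) while B returns True, which is the intended value given the function's name and docstring (at least 8 characters). — e.g. on comporte_au_moins_huit_caracteres("abcdefgh"): A returns false, B returns true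
import Mathlib
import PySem

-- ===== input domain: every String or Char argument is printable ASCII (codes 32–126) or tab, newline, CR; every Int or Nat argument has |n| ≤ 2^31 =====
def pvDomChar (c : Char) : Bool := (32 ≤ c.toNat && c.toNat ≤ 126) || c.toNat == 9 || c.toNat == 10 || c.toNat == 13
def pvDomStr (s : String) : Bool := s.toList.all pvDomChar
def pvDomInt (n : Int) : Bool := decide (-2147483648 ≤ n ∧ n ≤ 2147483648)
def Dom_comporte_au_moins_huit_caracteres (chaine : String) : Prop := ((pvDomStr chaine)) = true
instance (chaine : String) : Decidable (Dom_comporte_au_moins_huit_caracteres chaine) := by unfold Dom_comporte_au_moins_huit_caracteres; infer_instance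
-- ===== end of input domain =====

-- B replaces A's counting while-loop with the closed-form comparison len >= 8 (simpler);
-- A has an off-by-one and returns True only for length >= 9, stated as D_ below.


-- ===== PORT A =====
-- the while loop of A: state (indice, flag); one recursive call per iteration
def pvLoopA (len indice : Nat) (flag : Bool) : Bool :=
  if indice < len ∧ flag = false then
    pvLoopA len (indice + 1) (if indice > 7 then true else flag)
  else flag
termination_by len - indice

def comporte_au_moins_huit_caracteres (chaine : String) : Bool :=
  pvLoopA chaine.toList.length 0 false

-- ===== PORT B =====
def comporte_au_moins_huit_caracteres_alt (chaine : String) : Bool :=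
  decide (8 ≤ chaine.toList.length)

-- ===== PRECONDITION & SPEC =====
-- On strings of exactly 8 characters A returns False (its flag is only set at index 8,
-- i.e. only for length >= 9) while B returns True, the intended value given the function's name and docstring (at least 8 characters).
def D_comporte_au_moins_huit_caracteres (chaine : String) : Prop := chaine.toList.length = 8
instance (chaine : String) : Decidable (D_comporte_au_moins_huit_caracteres chaine) := by unfold D_comporte_au_moins_huit_caracteres; infer_instance

def Spec_comporte_au_moins_huit_caracteres (chaine : String) (out : Bool) : Prop :=
  ¬ D_comporte_au_moins_huit_caracteres chaine → out = comporte_au_moins_huit_caracteres_alt chaine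
instance (chaine : String) (out : Bool) : Decidable (Spec_comporte_au_moins_huit_caracteres chaine out) := by unfold Spec_comporte_au_moins_huit_caracteres; infer_instance

def pvDiffWitness_comporte_au_moins_huit_caracteres : String := "abcdefgh"
def pvDiffWitnessOut_comporte_au_moins_huit_caracteres : Bool × Bool := (false, true)

-- ===== CLAIM =====
def Claim_unchanged_comporte_au_moins_huit_caracteres : Prop := ∀ (chaine : String), Dom_comporte_au_moins_huit_caracteres chaine → Spec_comporte_au_moins_huit_caracteres chaine (comporte_au_moins_huit_caracteres chaine)
def Claim_changed_comporte_au_moins_huit_caracteres : Prop := Dom_comporte_au_moins_huit_caracteres (pvDiffWitness_comporte_au_moins_huit_caracteres) ∧ D_comporte_au_moins_huit_caracteres (pvDiffWitness_comporte_au_moins_huit_caracteres) ∧ comporte_au_moins_huit_caracteres (pvDiffWitness_comporte_au_moins_huit_caracteres) = pvDiffWitnessOut_comporte_au_moins_huit_caracteres.1 ∧ comporte_au_moins_huit_caracteres_alt (pvDiffWitness_comporte_au_moins_huit_caracteres) = pvDiffWitnessOut_comporte_au_moins_huit_caracteres.2 ∧ pvDiffWitnessOut_comporte_au_moins_huit_caracteres.1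 ≠ pvDiffWitnessOut_comporte_au_moins_huit_caracteres.2
def Claim_exact_comporte_au_moins_huit_caracteres : Prop := ∀ (chaine : String), Dom_comporte_au_moins_huit_caracteres chaine → D_comporte_au_moins_huit_caracteres chaine → comporte_au_moins_huit_caracteres chaine ≠ comporte_au_moins_huit_caracteres_alt chaine

-- ===== LEMMAS AND PROOFS =====
lemma pvLoopA_true (len indice : Nat) : pvLoopA len indice true = true := by
  unfold pvLoopA; simp

-- characterisation of A's loop: from any indice ≤ 8 with flag still false,
-- the loop returns true exactly when len ≥ 9
lemma pvLoopA_char : ∀ (k len indice : Nat), 9 - indice ≤ k → indice ≤ 8 →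
    pvLoopA len indice false = decide (9 ≤ len) := by
  intro k
  induction k with
  | zero => intro len i hk hi; omega
  | succ k ih =>
    intro len i hk hi
    unfold pvLoopA
    by_cases hlt : i < len
    · simp only [hlt, true_and]
      by_cases h7 : i > 7
      · have h8 : i = 8 := by omega
        simp [h7, pvLoopA_true, show (9 : Nat) ≤ len by omega]
      · simp only [if_neg h7]
        rw [if_pos (by simp)]
        exact ih len (i + 1) (by omega) (by omega)
    · simp [hlt, show ¬ (9 ≤ len) by omega]

lemma portA_eq (chaine : String) :
    comporte_au_moins_huit_caracteres chaine = decide (9 ≤ chaine.toList.length) := by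
  exact pvLoopA_char 9 _ 0 (by omega) (by omega)

-- ===== VERDICT =====
theorem comporte_au_moins_huit_caracteres_spec : Claim_unchanged_comporte_au_moins_huit_caracteres := by
  intro chaine _ hD
  rw [portA_eq]
  unfold comporte_au_moins_huit_caracteres_alt
  unfold D_comporte_au_moins_huit_caracteres at hD
  simp only [decide_eq_decide]
  omega

theorem comporte_au_moins_huit_caracteres_changed : Claim_changed_comporte_au_moins_huit_caracteres := by
  unfold Claim_changed_comporte_au_moins_huit_caracteres
  refine ⟨by decide, by decide, ?_, by decide, by decide⟩
  rw [portA_eq]; decide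

theorem comporte_au_moins_huit_caracteres_tight : Claim_exact_comporte_au_moins_huit_caracteres := by
  intro chaine _ hD
  rw [portA_eq]
  unfold comporte_au_moins_huit_caracteres_alt D_comporte_au_moins_huit_caracteres at *
  simp [hD]
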